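-- pv_equiv track=rewrite | github.com/julia0926/TIL_Algo | Programmers_lv1/135808_과일장수.py | solution
-- ===== SOURCE A (Python) =====
-- def solution(k, m, score):
--     start = 0
--     answer = 0
--     arr = sorted(score, reverse=True)
--     for i in range(1, (len(score)//m)+1):
--         answer += min(arr[start:i*m]) * m
--         start = i*m
--     return answer
-- ===== SOURCE B (Python) =====
-- def solution(k, m, score):
--     arr = sorted(score)
--     return m * sum(arr[len(score) % m :: m])
-- ===== Notes on version B (the rewrite author's own statement) =====
-- stated objective: simpler
-- what changed: Replaces the per-box slice-and-min loop over a descending sort with a single strided sum m*sum(sorted(score)[len(score)%m::m]) over an ascending sort: each box's minimum sits at a fixed stride, so no loop, slicing or min() remains.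
-- outside the precondition, e.g. on solution(0, -2, [1, 2, 3]): A returns 0, B returns -8
import Mathlib
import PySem

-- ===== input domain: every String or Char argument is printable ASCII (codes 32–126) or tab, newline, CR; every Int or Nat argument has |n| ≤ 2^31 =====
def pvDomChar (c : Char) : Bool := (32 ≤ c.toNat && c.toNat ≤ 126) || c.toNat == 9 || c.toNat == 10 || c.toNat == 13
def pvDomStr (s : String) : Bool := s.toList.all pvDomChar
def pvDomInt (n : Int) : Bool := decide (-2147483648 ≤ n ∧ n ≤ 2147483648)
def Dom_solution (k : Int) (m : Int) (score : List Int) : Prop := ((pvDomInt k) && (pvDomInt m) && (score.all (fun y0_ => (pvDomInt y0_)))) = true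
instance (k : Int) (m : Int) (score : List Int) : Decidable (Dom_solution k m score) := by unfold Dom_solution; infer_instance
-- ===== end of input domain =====

-- B replaces A's per-box slice-and-min loop (descending sort) by one strided sum over an ascending sort; objective: simpler.


-- ===== PORT A =====
-- 'min(arr[start:i*m])' never sees an empty slice when m ≥ 1 (each slice has m elements),
-- so the '.getD 0' default is never reached inside Pre_; Python raises at m = 0 ('//' by zero).
def solution (k : Int) (m : Int) (score : List Int) : Int :=
  let arr := PySem.List.sorted score (fun x => x) true
  let st := (PySem.List.pyRange 1 (PySem.Int.floordiv (score.length : Int) m + 1) 1).foldl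
    (fun (s : Int × Int) i =>
      (i * m,
       s.2 + ((PySem.List.min? (PySem.List.slice arr (some s.1) (some (i * m))) (fun x => x)).getD 0) * m))
    (0, 0)
  st.2

-- ===== PORT B =====
-- Source B: return m * sum(sorted(score)[len(score) % m :: m]); slice? is none only at step m = 0 (excluded by Pre_).
def solution_alt (k : Int) (m : Int) (score : List Int) : Int :=
  let arr := PySem.List.sorted score (fun x => x) false
  m * ((PySem.List.slice? arr (some (PySem.Int.mod (score.length : Int) m)) none m).getD []).sum

-- ===== PRECONDITION & SPEC =====
-- Pre_ excludes m ≤ 0: at m = 0 A raises ZeroDivisionError ('//' by zero) and B raises ValueError (slice step 0);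
-- for m < 0 (a meaningless box size, outside the task's natural domain) A's empty loop happens to return 0
-- while B's negative-stride slice walks the list backwards.
def Pre_solution (k : Int) (m : Int) (score : List Int) : Prop := 1 ≤ m
instance (k : Int) (m : Int) (score : List Int) : Decidable (Pre_solution k m score) := by unfold Pre_solution; infer_instance
def pvWitness_solution : Int × Int × List Int := (4, 3, [4, 1, 2, 4, 2, 1, 3, 1])
def Spec_solution (k : Int) (m : Int) (score : List Int) (out : Int) : Prop := out = solution_alt k m score
instance (k : Int) (m : Int) (score : List Int) (out : Int) : Decidable (Spec_solution k m score out) := by unfold Spec_solution; infer_instance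

-- ===== CLAIM (what is proved, stated in full; the proofs are below) =====
def Claim_equal_solution : Prop := ∀ (k : Int) (m : Int) (score : List Int), Dom_solution k m score → Pre_solution k m score → Spec_solution k m score (solution k m score)

-- ===== LEMMAS AND PROOFS =====
lemma sorted_desc_eq_reverse (score : List Int) :
    PySem.List.sorted score (fun x => x) true = (PySem.List.sorted score (fun x => x) false).reverse := by
  have hperm : (PySem.List.sorted score (fun x => x) true).reverse.Perm (PySem.List.sorted score (fun x => x) false) := by
    refine ((List.reverse_perm _).trans ?_)
    exact (PySem.List.sorted_perm score (fun x => x) true).trans (PySem.List.sorted_perm score (fun x => x) false).symm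
  have h := PySem.List.eq_of_perm_of_pairwise_le_of_injective (fun x : Int => x) (fun a b h => h)
    hperm
    (List.pairwise_reverse.mpr (PySem.List.sorted_pairwise_rev score (fun x => x)))
    (PySem.List.sorted_pairwise score (fun x => x))
  calc PySem.List.sorted score (fun x => x) true
      = (PySem.List.sorted score (fun x => x) true).reverse.reverse := by simp
    _ = (PySem.List.sorted score (fun x => x) false).reverse := by rw [h]
lemma min_block_aux (asc : List Int) (hp : asc.Pairwise (· ≤ ·)) (a b : Nat)
    (hab : a < b) (hb : b ≤ asc.length) :
    PySem.List.min? ((asc.reverse.drop a).take (b - a)) (fun x => x)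
      = some (asc.getD (asc.length - b) 0) := by
  have hnb : asc.length - b < asc.length := by omega
  have hgetD : asc.getD (asc.length - b) 0 = asc[asc.length - b] := List.getD_eq_getElem _ _ hnb
  have hlen : ((asc.reverse.drop a).take (b - a)).length = min (b - a) (asc.length - a) := by
    simp
  have helem : ∀ (i : Nat) (hi : i < ((asc.reverse.drop a).take (b - a)).length),
      ((asc.reverse.drop a).take (b - a))[i] = asc[asc.length - 1 - (a + i)]'(by rw [hlen] at hi; omega) := by
    intro i hi
    rw [List.getElem_take, List.getElem_drop, List.getElem_reverse]
  have hmem : ∀ y ∈ (asc.reverse.drop a).take (b - a), asc[asc.length - b] ≤ y := by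
    intro y hy
    rw [List.mem_iff_getElem] at hy
    obtain ⟨i, hi, rfl⟩ := hy
    rw [helem i hi]
    have hi' : i < b - a := by rw [hlen] at hi; omega
    rcases Nat.lt_or_ge (asc.length - b) (asc.length - 1 - (a + i)) with hlt | hge
    · exact (List.pairwise_iff_getElem.mp hp) _ _ _ _ hlt
    · have : asc.length - b = asc.length - 1 - (a + i) := by omega
      simp [this]
  have hidx : b - 1 - a < ((asc.reverse.drop a).take (b - a)).length := by rw [hlen]; omega
  have hin : asc[asc.length - b] ∈ (asc.reverse.drop a).take (b - a) := by
    refine List.mem_iff_getElem.mpr ⟨b - 1 - a, hidx, ?_⟩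
    rw [helem _ hidx]
    congr 1
    omega
  have hne : (asc.reverse.drop a).take (b - a) ≠ [] := by
    intro h; rw [h] at hlen; simp at hlen; omega
  rcases h : PySem.List.min? ((asc.reverse.drop a).take (b - a)) (fun x => x) with _ | v
  · exact absurd ((PySem.List.min?_eq_none_iff _ _).mp h) hne
  · have h1 := PySem.List.min?_isMin h _ hin
    have h2 := hmem v (PySem.List.min?_mem h)
    rw [hgetD, le_antisymm h1 h2]

lemma min_block (asc : List Int) (hp : asc.Pairwise (· ≤ ·)) (a b : Nat)
    (hab : a < b) (hb : b ≤ asc.length) :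
    PySem.List.min? (PySem.List.slice asc.reverse (some (a : Int)) (some (b : Int))) (fun x => x)
      = some (asc.getD (asc.length - b) 0) := by
  rw [PySem.List.slice_natCast]
  exact min_block_aux asc hp a b hab hb

lemma loopA (asc : List Int) (hp : asc.Pairwise (· ≤ ·)) (mN : Nat) (hm : 1 ≤ mN)
    (t : Nat) (ht : t * mN ≤ asc.length) :
    (PySem.List.pyRange 1 ((t : Int) + 1) 1).foldl
      (fun (s : Int × Int) i =>
        (i * (mN : Int),
         s.2 + ((PySem.List.min? (PySem.List.slice asc.reverse (some s.1) (some (i * (mN : Int)))) (fun x => x)).getD 0) * (mN : Int)))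
      (0, 0)
    = ((t : Int) * (mN : Int),
       (∑ j ∈ Finset.range t, asc.getD (asc.length - (j + 1) * mN) 0) * (mN : Int)) := by
  induction t with
  | zero => rw [PySem.List.pyRange_one_eq_nil (by norm_num)]; simp
  | succ t ih =>
    have ht' : t * mN ≤ asc.length := le_trans (Nat.mul_le_mul_right _ (Nat.le_succ t)) ht
    have hsplit : PySem.List.pyRange 1 (((t + 1 : Nat) : Int) + 1) 1
        = PySem.List.pyRange 1 ((t : Int) + 1) 1 ++ [(t : Int) + 1] := by
      have := PySem.List.pyRange_one_succ_right (show (1:Int) ≤ (t:Int)+1 by omega)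
      push_cast
      exact this
    rw [hsplit, List.foldl_append, ih ht']
    have hmin := min_block asc hp (t * mN) ((t + 1) * mN)
      (by nlinarith) (by exact_mod_cast ht)
    have hc1 : ((t : Int) * (mN : Int)) = ((t * mN : Nat) : Int) := by push_cast; ring
    have hc2 : (((t : Int) + 1) * (mN : Int)) = (((t + 1) * mN : Nat) : Int) := by push_cast; ring
    simp only [List.foldl_cons, List.foldl_nil, hc1, hc2, hmin, Option.getD_some]
    rw [Prod.mk.injEq]
    refine ⟨?_, ?_⟩
    · push_cast; ring
    · rw [Finset.sum_range_succ]
      ring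
lemma sliceB (asc : List Int) (mN : Nat) (hm : 1 ≤ mN) :
    (PySem.List.slice? asc (some ((asc.length % mN : Nat) : Int)) none ((mN : Nat) : Int)).getD []
      = (List.range (asc.length / mN)).map (fun kk => asc.getD (asc.length % mN + mN * kk) 0) := by
  have hmz : ((mN : Nat) : Int) ≠ 0 := by omega
  set n := asc.length with hn
  have hr : n % mN ≤ n := Nat.mod_le n mN
  rw [PySem.List.slice?]
  rw [if_neg hmz]
  simp only [PySem.List.sliceIndices]
  have h1 : ¬ ((mN : Int) < 0) := by omega
  rw [if_neg h1, if_neg h1, if_neg h1]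
  have h2 : ¬ (((n % mN : Nat) : Int) < 0) := by omega
  rw [if_neg h2]
  have h3 : min ((n % mN : Nat) : Int) (n : Int) = ((n % mN : Nat) : Int) := by omega
  rw [h3]
  have h4 : (0 : Int) < (mN : Int) := by omega
  rw [if_pos h4]
  rw [Option.getD_some]
  set r := n % mN with hrdef
  set q := n / mN with hqdef
  have hqm : q * mN + r = n := by
    have h := Nat.div_add_mod n mN
    rw [Nat.mul_comm] at h
    exact h
  have hcount : (if ((r : Nat) : Int) < (asc.length : Int) then (((asc.length : Int) - ((r : Nat) : Int) + (mN : Int) - 1) / (mN : Int)).toNat else 0) = q := by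
    by_cases hc : ((r : Nat) : Int) < (asc.length : Int)
    · rw [if_pos hc]
      have hnum : ((asc.length : Int) - ((r : Nat) : Int) + (mN : Int) - 1) = ((mN - 1 + q * mN : Nat) : Int) := by
        omega
      rw [hnum, ← Int.natCast_div, Int.toNat_natCast]
      rw [Nat.add_mul_div_right _ _ (by omega : 0 < mN), Nat.div_eq_of_lt (by omega)]
      omega
    · rw [if_neg hc]
      have hrn : r = n := by omega
      have hq0 : q * mN = 0 := by omega
      rcases Nat.mul_eq_zero.mp hq0 with h | h
      · omega
      · omega
  rw [hcount]
  have hstep : ∀ kk ∈ List.range q, asc[(((r : Nat) : Int) + (mN : Int) * ((kk : Nat) : Int)).toNat]? = some (asc.getD (r + mN * kk) 0) := by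
    intro kk hkk
    rw [List.mem_range] at hkk
    have hidx : r + mN * kk < n := by
      have h5 : mN * kk < mN * q := Nat.mul_lt_mul_of_pos_left hkk (by omega)
      have h6 : mN * q = q * mN := Nat.mul_comm _ _
      omega
    have hcast : (((r : Nat) : Int) + (mN : Int) * ((kk : Nat) : Int)).toNat = r + mN * kk := by
      omega
    rw [hcast, List.getElem?_eq_getElem (by omega), List.getD_eq_getElem _ _ (by omega)]
  calc List.filterMap (fun x => asc[(((r : Nat) : Int) + (mN : Int) * ((x : Nat) : Int)).toNat]?) (List.range q)
      = List.filterMap (fun x => some (asc.getD (r + mN * x) 0)) (List.range q) := List.filterMap_congr hstep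
    _ = List.map (fun kk => asc.getD (r + mN * kk) 0) (List.range q) := by
        simp


-- ===== VERDICT (by name: the statement is the Claim_ definition above) =====
theorem solution_spec : Claim_equal_solution := by
  intro k m score _ hpre
  have hm0 : (0 : Int) ≤ m := by unfold Pre_solution at hpre; omega
  obtain ⟨mN, rfl⟩ : ∃ mN : Nat, m = (mN : Int) := ⟨m.toNat, (Int.toNat_of_nonneg hm0).symm⟩
  have hm : 1 ≤ mN := by unfold Pre_solution at hpre; exact_mod_cast hpre
  unfold Spec_solution solution solution_alt
  simp only []
  set asc := PySem.List.sorted score (fun x => x) false with hasc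
  have hp : asc.Pairwise (· ≤ ·) := PySem.List.sorted_pairwise score (fun x => x)
  have hlen : asc.length = score.length := PySem.List.length_sorted score (fun x => x) false
  set q := asc.length / mN with hq
  set r := asc.length % mN with hrd
  have hqm : q * mN + r = asc.length := by
    have h := Nat.div_add_mod asc.length mN
    rw [Nat.mul_comm] at h
    exact h
  -- A side
  rw [sorted_desc_eq_reverse score]
  have hfd : PySem.Int.floordiv ((score.length : Nat) : Int) ((mN : Nat) : Int) = ((q : Nat) : Int) := by
    rw [PySem.Int.floordiv_natCast, hq, hlen]
  rw [hfd, loopA asc hp mN hm q (by rw [hq]; exact Nat.div_mul_le_self _ _)]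
  -- B side
  have hmd : PySem.Int.mod ((score.length : Nat) : Int) ((mN : Nat) : Int) = ((r : Nat) : Int) := by
    rw [PySem.Int.mod_natCast, hrd, hlen]
  rw [hmd, ← hlen] at *
  have hB := sliceB asc mN hm
  rw [← hrd, ← hq] at hB
  rw [hB]
  have hsum : ((List.range q).map (fun kk => asc.getD (r + mN * kk) 0)).sum
      = ∑ j ∈ Finset.range q, asc.getD (r + mN * j) 0 := rfl
  rw [hsum]
  -- reindex the A-side sum and finish
  have hcongr : (∑ j ∈ Finset.range q, asc.getD (asc.length - (j + 1) * mN) 0)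
      = ∑ j ∈ Finset.range q, asc.getD (r + mN * (q - 1 - j)) 0 := by
    refine Finset.sum_congr rfl ?_
    intro j hj
    rw [Finset.mem_range] at hj
    congr 1
    have h7 : mN * (q - 1 - j) + mN * (j + 1) = mN * q := by
      rw [← Nat.mul_add]
      congr 1
      omega
    have h9 : (j + 1) * mN = mN * (j + 1) := Nat.mul_comm _ _
    have h10 : q * mN = mN * q := Nat.mul_comm _ _
    omega
  rw [hcongr, Finset.sum_range_reflect (fun j => asc.getD (r + mN * j) 0) q]
  ring
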